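-- pv_equiv track=rewrite | github.com/SmithLiu95/JoCoR | data/metric_data.py | reidx
-- ===== SOURCE A (Python) =====
-- def reidx(label_list):
--     new_class=[]
--     new_class_d={}
--     for i in range(len(label_list)):
--         old_class=label_list[i]
--         if old_class not in new_class_d:
--             new_class_d[old_class]=str(len(new_class_d))
--         new_class.append(new_class_d[old_class])
--     label_list=new_class
--     return label_list
-- ===== SOURCE B (Python) =====
-- def reidx(label_list):
--     # id of a label = number of distinct labels seen strictly before its first occurrence
--     return [str(len(set(label_list[:label_list.index(x)]))) for x in label_list]
-- ===== Notes on version B (the rewrite author's own statement) =====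
-- stated objective: alternative
-- what changed: B discards A's incrementally built id dictionary: each label's id is computed directly as the size of the set of labels occurring strictly before that label's first occurrence (per-element prefix-set computation), trading A's O(n) single pass for a dictionary-free O(n^2) formulation.
import Mathlib
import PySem

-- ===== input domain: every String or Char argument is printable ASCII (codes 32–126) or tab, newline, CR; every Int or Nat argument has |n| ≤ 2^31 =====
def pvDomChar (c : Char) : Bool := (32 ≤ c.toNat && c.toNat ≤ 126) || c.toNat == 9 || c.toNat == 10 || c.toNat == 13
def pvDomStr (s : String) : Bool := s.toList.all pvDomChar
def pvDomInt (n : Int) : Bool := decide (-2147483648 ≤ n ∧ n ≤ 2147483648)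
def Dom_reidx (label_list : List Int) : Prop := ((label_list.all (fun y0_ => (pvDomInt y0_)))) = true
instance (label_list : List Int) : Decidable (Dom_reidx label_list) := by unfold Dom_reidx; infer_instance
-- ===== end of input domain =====

-- B drops A's incrementally-built id dictionary entirely: each label's id is computed
-- directly as the number of distinct labels strictly before its first occurrence
-- (per-element set-of-prefix computation; alternative algorithm, O(n^2) vs A's O(n)).

-- ===== PORT A =====
def reidx (label_list : List Int) : List String :=
  let st := (PySem.List.pyRange 0 (PySem.List.len label_list) 1).foldl
    (fun (st : List String × PySem.Dict Int String) i =>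
      let old_class := PySem.List.pyGetD label_list i 0
      let d := if st.2.contains old_class then st.2
               else st.2.insert old_class (PySem.Int.toStr (PySem.Dict.size st.2 : Int))
      (st.1 ++ [d.getD old_class ""], d))
    ([], PySem.Dict.empty)
  st.1

-- ===== PORT B =====
def reidx_alt (label_list : List Int) : List String :=
  label_list.map (fun x =>
    -- x is drawn from label_list, so label_list.index(x) never raises; .getD 0 is unreachable
    let j : Nat := (PySem.List.index? label_list x).getD 0
    PySem.Int.toStr ((PySem.Set.ofList (PySem.List.slice label_list none (some (j : Int)))).length : Int))

-- ===== PRECONDITION & SPEC =====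
def Spec_reidx (label_list : List Int) (out : List String) : Prop := out = reidx_alt label_list
instance (label_list : List Int) (out : List String) : Decidable (Spec_reidx label_list out) := by unfold Spec_reidx; infer_instance

-- ===== CLAIM (what is proved, stated in full; the proofs are below) =====
def Claim_equal_reidx : Prop := ∀ (label_list : List Int), Dom_reidx label_list → Spec_reidx label_list (reidx label_list)

-- ===== LEMMAS AND PROOFS =====

-- A's loop body (named for the proofs; definitionally the lambda inside reidx).
def stepA (st : List String × PySem.Dict Int String) (old_class : Int) :
    List String × PySem.Dict Int String :=
  let d := if st.2.contains old_class then st.2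
           else st.2.insert old_class (PySem.Int.toStr (PySem.Dict.size st.2 : Int))
  (st.1 ++ [d.getD old_class ""], d)

-- The dict mapping each element of u to the string of its position.
def idxDict (u : List Int) : PySem.Dict Int String :=
  PySem.Dict.mk ((PySem.List.enumerate u).map (fun p => (p.2, PySem.Int.toStr p.1)))

theorem keys_idxDict (u : List Int) : (idxDict u).keys = u := by
  simp [idxDict, PySem.Dict.keys, Function.comp_def, PySem.List.map_snd_enumerate]

theorem size_idxDict (u : List Int) : PySem.Dict.size (idxDict u) = u.length := by
  simp [idxDict, PySem.Dict.size, PySem.List.length_enumerate]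

theorem contains_idxDict (u : List Int) (x : Int) :
    (idxDict u).contains x = decide (x ∈ u) := by
  rw [PySem.Dict.contains_eq_decide_mem_keys, keys_idxDict]

theorem getD_idxDict (u : List Int) (hu : u.Nodup) (x : Int) (hx : x ∈ u) :
    (idxDict u).getD x "" = PySem.Int.toStr (List.idxOf x u : Int) := by
  have hk : List.idxOf x u < u.length := List.idxOf_lt_length_of_mem hx
  have hmem : (x, PySem.Int.toStr (List.idxOf x u : Int)) ∈ (idxDict u).items := by
    simp only [idxDict]
    refine List.mem_map.mpr ?_
    refine ⟨((List.idxOf x u : Int), x), ?_, by simp⟩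
    exact (PySem.List.mem_enumerate_iff u 0 _).mpr
      ⟨List.idxOf x u, hk, by simp [List.getElem_idxOf hk]⟩
  exact PySem.Dict.getD_of_mem_items _ hmem (by rw [keys_idxDict]; exact hu) _

theorem idxDict_append_singleton (u : List Int) (x : Int) (hx : x ∉ u) :
    (idxDict u).insert x (PySem.Int.toStr (u.length : Int)) = idxDict (u ++ [x]) := by
  apply PySem.Dict.ext
  rw [PySem.Dict.items_insert_of_not_contains _ _ (by simp [contains_idxDict, hx])]
  simp [idxDict, PySem.List.enumerate_append, PySem.List.enumerate_cons]

theorem update_extends (l u : List Int) : ∃ t, PySem.Set.update u l = u ++ t := by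
  induction l generalizing u with
  | nil => exact ⟨[], (List.append_nil u).symm⟩
  | cons x l ih =>
    by_cases hx : x ∈ u
    · have h : PySem.Set.add u x = u := by simp [PySem.Set.add, PySem.Set.contains, hx]
      obtain ⟨t, ht⟩ := ih u
      exact ⟨t, by simpa [PySem.Set.update, h] using ht⟩
    · have h : PySem.Set.add u x = u ++ [x] := by simp [PySem.Set.add, PySem.Set.contains, hx]
      obtain ⟨t, ht⟩ := ih (u ++ [x])
      exact ⟨x :: t, by simpa [PySem.Set.update, h] using ht⟩

theorem idxOf_update_of_mem (l u : List Int) (x : Int) (hx : x ∈ u) :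
    List.idxOf x (PySem.Set.update u l) = List.idxOf x u := by
  obtain ⟨t, ht⟩ := update_extends l u
  rw [ht]
  exact List.idxOf_append_of_mem hx

-- A's loop, started on the dict of an already-seen nodup list u, emits the
-- positions of each element in the final first-appearance list Set.update u l.
theorem loopA (l u : List Int) (hu : u.Nodup) (out : List String) :
    l.foldl stepA (out, idxDict u)
    = (out ++ l.map (fun x => PySem.Int.toStr (List.idxOf x (PySem.Set.update u l) : Int)),
       idxDict (PySem.Set.update u l)) := by
  induction l generalizing u out with
  | nil => simp [PySem.Set.update]
  | cons x l ih =>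
    rw [List.foldl_cons]
    by_cases hx : x ∈ u
    · have hadd : PySem.Set.add u x = u := by simp [PySem.Set.add, PySem.Set.contains, hx]
      have hupd : PySem.Set.update u (x :: l) = PySem.Set.update u l := by
        simp [PySem.Set.update, hadd]
      simp only [stepA, contains_idxDict, hx, decide_true, if_true]
      rw [getD_idxDict u hu x hx, ih u hu]
      rw [hupd, List.map_cons, idxOf_update_of_mem l u x hx]
      simp
    · have hadd : PySem.Set.add u x = u ++ [x] := by simp [PySem.Set.add, PySem.Set.contains, hx]
      have hupd : PySem.Set.update u (x :: l) = PySem.Set.update (u ++ [x]) l := by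
        simp [PySem.Set.update, hadd]
      have hnd : (u ++ [x]).Nodup := by
        rw [List.nodup_append]
        exact ⟨hu, by simp, by
          simpa [List.disjoint_singleton] using fun a (ha : a ∈ u) (h : a = x) => hx (h ▸ ha)⟩
      have hidx : List.idxOf x (u ++ [x]) = u.length := by
        rw [List.idxOf_append, if_neg hx]; simp
      simp only [stepA, contains_idxDict, hx, decide_false, Bool.false_eq_true, if_false,
        size_idxDict]
      rw [idxDict_append_singleton u x hx,
          getD_idxDict (u ++ [x]) hnd x (by simp), hidx, ih (u ++ [x]) hnd]
      rw [hupd, List.map_cons]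
      have hx' : x ∈ u ++ [x] := by simp
      rw [idxOf_update_of_mem l (u ++ [x]) x hx', hidx]
      simp

theorem update_nil_eq_dedup (xs : List Int) :
    PySem.Set.update [] xs = PySem.List.dedup xs := by
  rw [PySem.List.dedup_eq_ofList, PySem.Set.ofList_eq_foldl]
  rfl

-- x does not occur strictly before its own first occurrence.
theorem not_mem_take_idxOf (xs : List Int) (x : Int) :
    x ∉ xs.take (List.idxOf x xs) := by
  induction xs with
  | nil => simp
  | cons a l ih =>
    by_cases hax : a = x
    · subst hax; simp [List.idxOf_cons_self]
    · rw [List.idxOf_cons, show (a == x) = false by simpa using hax, cond_false,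
        List.take_succ_cons]
      simp only [List.mem_cons, not_or]
      exact ⟨fun h => hax h.symm, ih⟩

theorem index?_eq_some_idxOf (xs : List Int) (x : Int) (hx : x ∈ xs) :
    PySem.List.index? xs x = some (List.idxOf x xs) := by
  obtain ⟨k, hk⟩ := Option.isSome_iff_exists.mp ((PySem.List.index?_isSome_iff xs x).mpr hx)
  obtain ⟨pre, suf, hsp, hlen, hnp⟩ := (PySem.List.index?_eq_some_iff xs x k).mp hk
  have hidx : List.idxOf x xs = k := by
    rw [hsp, List.idxOf_append, if_neg hnp, List.idxOf_cons_self]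
    omega
  rw [hk, hidx]

-- CRUX: x's position in the first-appearance list = number of distinct labels
-- strictly before x's first occurrence.
theorem idxOf_dedup_eq_length_ofList_take (xs : List Int) (x : Int) (hx : x ∈ xs) :
    List.idxOf x (PySem.List.dedup xs)
      = (PySem.Set.ofList (xs.take (List.idxOf x xs))).length := by
  set j := List.idxOf x xs with hj
  have hjlt : j < xs.length := List.idxOf_lt_length_of_mem hx
  have hsplit : xs = xs.take j ++ x :: xs.drop (j + 1) := by
    conv_lhs => rw [← List.take_append_drop j xs]
    rw [List.drop_eq_getElem_cons hjlt, List.getElem_idxOf hjlt]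
  have hnm : x ∉ PySem.Set.ofList (xs.take j) := by
    rw [PySem.Set.mem_ofList]
    exact not_mem_take_idxOf xs x
  have hadd : PySem.Set.add (PySem.Set.ofList (xs.take j)) x
      = PySem.Set.ofList (xs.take j) ++ [x] := by
    simp [PySem.Set.add, PySem.Set.contains, hnm]
  have hded : PySem.List.dedup xs
      = PySem.Set.update (PySem.Set.ofList (xs.take j) ++ [x]) (xs.drop (j + 1)) := by
    rw [PySem.List.dedup_eq_ofList]
    conv_lhs => rw [hsplit]
    rw [PySem.Set.ofList_append, PySem.Set.update_cons, hadd]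
  obtain ⟨t, ht⟩ := update_extends (xs.drop (j + 1)) (PySem.Set.ofList (xs.take j) ++ [x])
  rw [hded, ht, List.append_assoc, List.idxOf_append, if_neg hnm]
  simp

-- ===== VERDICT (by name: the statement is the Claim_ definition above) =====
theorem reidx_spec : Claim_equal_reidx := by
  intro xs _
  show reidx xs = reidx_alt xs
  have hA := congrArg Prod.fst
    (PySem.List.foldl_pyRange_pyGetD xs 0 stepA ([], PySem.Dict.empty) (le_refl 0))
  calc reidx xs
      = (List.foldl stepA ([], PySem.Dict.empty) (List.drop (0 : Int).toNat xs)).1 := hA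
    _ = xs.map (fun x => PySem.Int.toStr (List.idxOf x (PySem.Set.update [] xs) : Int)) := by
        rw [show List.drop (0 : Int).toNat xs = xs from List.drop_zero,
            show (PySem.Dict.empty : PySem.Dict Int String) = idxDict [] from rfl,
            loopA xs [] List.nodup_nil []]
        simp
    _ = reidx_alt xs := by
        unfold reidx_alt
        refine List.map_congr_left (fun x hx => ?_)
        have hidx : PySem.List.index? xs x = some (List.idxOf x xs) :=
          index?_eq_some_idxOf xs x hx
        rw [update_nil_eq_dedup, idxOf_dedup_eq_length_ofList_take xs x hx]
        rw [hidx]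
        simp [PySem.List.slice_to_natCast]
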